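-- pv_equiv track=rewrite | github.com/delcain/MegaSena | src/advanced_analytics.py | _cold_numbers_prediction
-- ===== SOURCE A (Python) =====
-- from typing import List, Dict, Tuple, Optional
--
-- def _cold_numbers_prediction(historical_data: List[List[int]]) -> List[int]:
--     """Predição baseada nos números mais frios (maior atraso)."""
--     # Calcular atrasos
--     delays = {}
--     for num in range(1, 61):
--         for i, draw in enumerate(reversed(historical_data)):
--             if num in draw:
--                 delays[num] = i
--                 break
--         else:
--             delays[num] = len(historical_data)  # Nunca apareceu
--
--     # Ordenar por atraso
--     cold_numbers = sorted(delays.keys(), key=lambda x: delays[x], reverse=True)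
--
--     # Selecionar alguns dos mais atrasados
--     selected = cold_numbers[:6]
--
--     return sorted(selected)
-- ===== SOURCE B (Python) =====
-- from typing import List
--
--
-- def _cold_numbers_prediction(historical_data: List[List[int]]) -> List[int]:
--     """Predição baseada nos números mais frios (maior atraso).
--
--     Single reverse pass: record the first-seen delay of each number once,
--     stopping as soon as all 60 numbers have been seen.
--     """
--     n = len(historical_data)
--     delay = {}
--     for i, draw in enumerate(reversed(historical_data)):
--         if len(delay) == 60:
--             break
--         for num in draw:
--             if 1 <= num <= 60 and num not in delay:
--                 delay[num] = i
--     cold = sorted(range(1, 61), key=lambda x: delay.get(x, n), reverse=True)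
--     return sorted(cold[:6])
-- ===== Notes on version B (the rewrite author's own statement) =====
-- stated objective: alternative
-- what changed: Instead of scanning the reversed history once per number (60 scans, each with an inner break), B makes a single reverse pass over the draws recording each number's first-seen delay in a dict, stopping early once all 60 numbers have been seen, then sorts 1..60 by that delay.
import Mathlib
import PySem

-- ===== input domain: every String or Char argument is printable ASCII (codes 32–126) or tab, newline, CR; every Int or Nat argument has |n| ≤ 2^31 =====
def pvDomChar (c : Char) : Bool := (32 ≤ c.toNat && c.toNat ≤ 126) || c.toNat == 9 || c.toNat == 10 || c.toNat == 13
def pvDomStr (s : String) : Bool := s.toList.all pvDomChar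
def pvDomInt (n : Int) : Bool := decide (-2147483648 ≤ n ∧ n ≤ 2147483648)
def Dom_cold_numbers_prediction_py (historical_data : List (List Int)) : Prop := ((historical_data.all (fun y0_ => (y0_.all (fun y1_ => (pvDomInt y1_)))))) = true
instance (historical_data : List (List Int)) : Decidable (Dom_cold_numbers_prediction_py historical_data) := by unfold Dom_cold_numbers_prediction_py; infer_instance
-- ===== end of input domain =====

-- B replaces A's per-number scan of the history (60 passes) with ONE reverse pass
-- recording each number's first-seen delay in a dict (early exit once all 60 are seen).

-- ===== PORT A =====
-- inner loop 'for i, draw in enumerate(reversed(historical_data)): if num in draw: -> i; else: -> n'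
def pvAInner (num : Int) (n : Int) : List (Int × List Int) → Int
  | [] => n
  | (i, draw) :: rest => if num ∈ draw then i else pvAInner num n rest

def cold_numbers_prediction_py (historical_data : List (List Int)) : List Int :=
  let delays : PySem.Dict Int Int :=
    (PySem.List.pyRange 1 61 1).foldl
      (fun d num =>
        d.insert num (pvAInner num (historical_data.length : Int)
          (PySem.List.enumerate historical_data.reverse 0)))
      PySem.Dict.empty
  let cold_numbers := PySem.List.sorted delays.keys (fun x => delays.getD x 0) true
  let selected := PySem.List.slice cold_numbers none (some 6)
  PySem.List.sorted selected (fun x => x) false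

-- ===== PORT B =====
-- reverse pass with early exit: 'for i, draw in enumerate(reversed(h)): if len(delay)==60: break; for num in draw: ...'
def pvBOuter (d : PySem.Dict Int Int) : List (Int × List Int) → PySem.Dict Int Int
  | [] => d
  | p :: rest =>
    if d.size == 60 then d
    else pvBOuter
      (p.2.foldl
        (fun d num =>
          if 1 ≤ num && num ≤ 60 && !(d.contains num) then d.insert num p.1 else d)
        d) rest

def cold_numbers_prediction_py_alt (historical_data : List (List Int)) : List Int :=
  let n : Int := (historical_data.length : Int)
  let delay : PySem.Dict Int Int :=
    pvBOuter PySem.Dict.empty (PySem.List.enumerate historical_data.reverse 0)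
  let cold := PySem.List.sorted (PySem.List.pyRange 1 61 1) (fun x => delay.getD x n) true
  PySem.List.sorted (PySem.List.slice cold none (some 6)) (fun x => x) false

-- ===== PRECONDITION & SPEC =====
def Spec_cold_numbers_prediction_py (historical_data : List (List Int)) (out : List Int) : Prop := out = cold_numbers_prediction_py_alt historical_data
instance (historical_data : List (List Int)) (out : List Int) : Decidable (Spec_cold_numbers_prediction_py historical_data out) := by unfold Spec_cold_numbers_prediction_py; infer_instance

-- ===== CLAIM (what is proved, stated in full; the proofs are below) =====
def Claim_equal_cold_numbers_prediction_py : Prop := ∀ (historical_data : List (List Int)), Dom_cold_numbers_prediction_py historical_data → Spec_cold_numbers_prediction_py historical_data (cold_numbers_prediction_py historical_data)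

-- ===== LEMMAS AND PROOFS =====

-- sorted only compares members: congruence in the comparator / key function
theorem pv_insertBy_congr {α : Type} (c1 c2 : α → α → Bool) (x : α) (acc : List α)
    (h : ∀ y ∈ acc, c1 x y = c2 x y) :
    PySem.List.insertBy c1 x acc = PySem.List.insertBy c2 x acc := by
  induction acc with
  | nil => rfl
  | cons y ys ih =>
    simp only [PySem.List.insertBy, h y (by simp)]
    rw [ih (fun z hz => h z (by simp [hz]))]

theorem pv_foldl_insertBy_congr {α : Type} (S : List α) (c1 c2 : α → α → Bool)
    (h : ∀ a ∈ S, ∀ b ∈ S, c1 a b = c2 a b) :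
    ∀ (xs acc : List α), (∀ a ∈ xs, a ∈ S) → (∀ a ∈ acc, a ∈ S) →
      xs.foldl (fun acc x => PySem.List.insertBy c1 x acc) acc
        = xs.foldl (fun acc x => PySem.List.insertBy c2 x acc) acc := by
  intro xs
  induction xs with
  | nil => intro acc _ _; rfl
  | cons x t ih =>
    intro acc hxs hacc
    simp only [List.foldl_cons]
    rw [pv_insertBy_congr c1 c2 x acc
      (fun y hy => h x (hxs x (by simp)) y (hacc y hy))]
    exact ih _ (fun a ha => hxs a (by simp [ha]))
      (fun a ha => by
        rcases (PySem.List.mem_insertBy _ _ _ _).1 ha with h1 | h1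
        · exact h1 ▸ hxs x (by simp)
        · exact hacc a h1)

theorem pv_sorted_rev_key_congr {α κ : Type} [LinearOrder κ] (xs : List α) (k1 k2 : α → κ)
    (h : ∀ x ∈ xs, k1 x = k2 x) :
    PySem.List.sorted xs k1 true = PySem.List.sorted xs k2 true := by
  rw [PySem.List.sorted_rev_eq_foldl_insertBy, PySem.List.sorted_rev_eq_foldl_insertBy]
  exact pv_foldl_insertBy_congr xs _ _
    (fun a ha b hb => by rw [h a ha, h b hb]) xs [] (fun a ha => ha) (by simp)

-- A's dict: keys are 1..60 and the value at x is g x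
theorem pv_A_keys (g : Int → Int) :
    ((PySem.List.pyRange 1 61 1).foldl (fun d num => d.insert num (g num)) PySem.Dict.empty).keys
      = PySem.List.pyRange 1 61 1 := by
  rw [PySem.Dict.keys_foldl_insert]
  simp [PySem.Set.update_nil_left,
    PySem.Set.ofList_eq_self_of_nodup _ (PySem.List.nodup_pyRange_one 1 61)]

theorem pv_A_getD (g : Int → Int) (x : Int) (hx : x ∈ PySem.List.pyRange 1 61 1) :
    ((PySem.List.pyRange 1 61 1).foldl (fun d num => d.insert num (g num)) PySem.Dict.empty).getD x 0
      = g x := by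
  have hitems := PySem.Dict.items_foldl_insert_fresh (l := PySem.List.pyRange 1 61 1)
    (d := PySem.Dict.empty) (k := fun a => a) (v := fun a => g a)
    (by intro a _; simp [PySem.Dict.contains_empty])
    (by simpa using PySem.List.nodup_pyRange_one 1 61)
  apply PySem.Dict.getD_of_mem_items
  · rw [hitems]
    simp only [show (PySem.Dict.empty : PySem.Dict Int Int).items = [] from rfl,
      List.nil_append]
    exact List.mem_map.2 ⟨x, hx, rfl⟩
  · rw [PySem.Dict.keys_foldl_insert]
    simp [PySem.Set.update_nil_left,
      PySem.Set.ofList_eq_self_of_nodup _ (PySem.List.nodup_pyRange_one 1 61),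
      PySem.List.nodup_pyRange_one 1 61]

-- B's inner fold over one draw
theorem pv_B_inner_contains (draw : List Int) (i : Int) (d : PySem.Dict Int Int) (x : Int)
    (hx : 1 ≤ x ∧ x ≤ 60) :
    (draw.foldl (fun d num => if 1 ≤ num && num ≤ 60 && !(d.contains num) then d.insert num i else d) d).contains x
      = (d.contains x || decide (x ∈ draw)) := by
  induction draw generalizing d with
  | nil => simp
  | cons num rest ih =>
    by_cases hcnd : (1 ≤ num && num ≤ 60 && !(d.contains num)) = true
    · rw [List.foldl_cons, if_pos hcnd, ih]
      rw [PySem.Dict.contains_insert]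
      by_cases hxn : x = num
      · subst hxn
        have hc : d.contains x = false := by
          simp only [Bool.and_eq_true, Bool.not_eq_true'] at hcnd
          exact hcnd.2
        simp [hc]
      · simp [hxn, List.mem_cons, Bool.or_assoc]
    · rw [List.foldl_cons, if_neg hcnd, ih]
      by_cases hxn : x = num
      · subst hxn
        have hc : d.contains x = true := by
          simp only [Bool.and_eq_true, Bool.not_eq_true', decide_eq_true_eq] at hcnd
          by_contra hcf
          exact hcnd ⟨⟨by simpa using hx.1, by simpa using hx.2⟩,
            by simpa using hcf⟩
        simp [hc]
      · simp [hxn, List.mem_cons]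

theorem pv_B_inner_getD (draw : List Int) (i n : Int) (d : PySem.Dict Int Int) (x : Int)
    (hx : 1 ≤ x ∧ x ≤ 60) :
    (draw.foldl (fun d num => if 1 ≤ num && num ≤ 60 && !(d.contains num) then d.insert num i else d) d).getD x n
      = if d.contains x = false ∧ x ∈ draw then i else d.getD x n := by
  induction draw generalizing d with
  | nil => simp
  | cons num rest ih =>
    by_cases hcnd : (1 ≤ num && num ≤ 60 && !(d.contains num)) = true
    · rw [List.foldl_cons, if_pos hcnd, ih]
      rw [PySem.Dict.contains_insert, PySem.Dict.getD_insert]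
      by_cases hxn : x = num
      · subst hxn
        have hc : d.contains x = false := by
          simp only [Bool.and_eq_true, Bool.not_eq_true'] at hcnd
          exact hcnd.2
        simp [hc]
      · simp [hxn, List.mem_cons]
    · rw [List.foldl_cons, if_neg hcnd, ih]
      by_cases hxn : x = num
      · subst hxn
        have hc : d.contains x = true := by
          simp only [Bool.and_eq_true, Bool.not_eq_true', decide_eq_true_eq] at hcnd
          by_contra hcf
          exact hcnd ⟨⟨by simpa using hx.1, by simpa using hx.2⟩,
            by simpa using hcf⟩
        simp [hc]
      · simp [hxn, List.mem_cons]

-- the inner fold keeps the dict's keys distinct and inside 1..60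
theorem pv_B_inner_nodup (draw : List Int) (i : Int) (d : PySem.Dict Int Int)
    (hnd : d.keys.Nodup) :
    (draw.foldl (fun d num => if 1 ≤ num && num ≤ 60 && !(d.contains num) then d.insert num i else d) d).keys.Nodup := by
  induction draw generalizing d with
  | nil => exact hnd
  | cons num rest ih =>
    rw [List.foldl_cons]
    apply ih
    split
    · exact PySem.Dict.nodup_keys_insert _ _ _ hnd
    · exact hnd

theorem pv_B_inner_range (draw : List Int) (i : Int) (d : PySem.Dict Int Int)
    (hr : ∀ k ∈ d.keys, 1 ≤ k ∧ k ≤ 60) :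
    ∀ k ∈ (draw.foldl (fun d num => if 1 ≤ num && num ≤ 60 && !(d.contains num) then d.insert num i else d) d).keys,
      1 ≤ k ∧ k ≤ 60 := by
  induction draw generalizing d with
  | nil => exact hr
  | cons num rest ih =>
    rw [List.foldl_cons]
    apply ih
    by_cases hcnd : (1 ≤ num && num ≤ 60 && !(d.contains num)) = true
    · rw [if_pos hcnd]
      intro k hk
      rcases (PySem.Dict.mem_keys_insert _ _ _ _).1 hk with h1 | h1
      · subst h1
        simp only [Bool.and_eq_true, decide_eq_true_eq] at hcnd
        exact ⟨hcnd.1.1, hcnd.1.2⟩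
      · exact hr k h1
    · rw [if_neg hcnd]; exact hr

-- a dict with 60 distinct keys inside 1..60 contains every x in 1..60
theorem pv_full_contains (d : PySem.Dict Int Int) (x : Int)
    (hx : 1 ≤ x ∧ x ≤ 60) (hnd : d.keys.Nodup) (hr : ∀ k ∈ d.keys, 1 ≤ k ∧ k ≤ 60)
    (hsz : d.size = 60) :
    d.contains x = true := by
  have hsub : d.keys ⊆ PySem.List.pyRange 1 61 1 := by
    intro k hk
    have := hr k hk
    exact (PySem.List.mem_pyRange_one).2 ⟨this.1, by omega⟩
  have hlen : d.keys.length = 60 := by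
    simpa [PySem.Dict.keys, PySem.Dict.size] using hsz
  have hperm : d.keys.Perm (PySem.List.pyRange 1 61 1) :=
    (List.Nodup.subperm hnd hsub).perm_of_length_le
      (by rw [hlen, PySem.List.length_pyRange_one]; rfl)
  exact (PySem.Dict.contains_iff_mem_keys _ _).2
    (hperm.mem_iff.2 ((PySem.List.mem_pyRange_one).2 ⟨hx.1, by omega⟩))

-- B's early-exiting reverse pass computes A's inner scan
theorem pv_B_outer (e : List (Int × List Int)) (n : Int) (d : PySem.Dict Int Int) (x : Int)
    (hx : 1 ≤ x ∧ x ≤ 60) (hnd : d.keys.Nodup) (hr : ∀ k ∈ d.keys, 1 ≤ k ∧ k ≤ 60) :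
    (pvBOuter d e).getD x n
      = if d.contains x then d.getD x n else pvAInner x n e := by
  induction e generalizing d with
  | nil =>
    simp only [pvBOuter, pvAInner]
    by_cases hc : d.contains x
    · simp [hc]
    · simp [hc, PySem.Dict.getD_of_not_contains _ _ (by simpa using hc)]
  | cons p rest ih =>
    rw [pvBOuter]
    by_cases hfull : d.size == 60
    · rw [if_pos hfull]
      have hc : d.contains x = true :=
        pv_full_contains d x hx hnd hr (by simpa using hfull)
      simp [hc]
    · rw [if_neg hfull,
        ih _ (pv_B_inner_nodup p.2 p.1 d hnd) (pv_B_inner_range p.2 p.1 d hr)]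
      simp only [pvAInner]
      rw [pv_B_inner_contains p.2 p.1 d x hx, pv_B_inner_getD p.2 p.1 n d x hx]
      by_cases hc : d.contains x
      · simp [hc]
      · by_cases hm : x ∈ p.2 <;> simp [hc, hm]

-- ===== VERDICT (by name: the statement is the Claim_ definition above) =====
theorem cold_numbers_prediction_py_spec : Claim_equal_cold_numbers_prediction_py := by
  intro h _
  unfold Spec_cold_numbers_prediction_py cold_numbers_prediction_py cold_numbers_prediction_py_alt
  dsimp only
  have hsort :
      PySem.List.sorted
        ((PySem.List.pyRange 1 61 1).foldl
          (fun d num => d.insert num (pvAInner num (h.length : Int)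
            (PySem.List.enumerate h.reverse 0))) PySem.Dict.empty).keys
        (fun x => ((PySem.List.pyRange 1 61 1).foldl
          (fun d num => d.insert num (pvAInner num (h.length : Int)
            (PySem.List.enumerate h.reverse 0))) PySem.Dict.empty).getD x 0) true
      = PySem.List.sorted (PySem.List.pyRange 1 61 1)
        (fun x => (pvBOuter PySem.Dict.empty
          (PySem.List.enumerate h.reverse 0)).getD x (h.length : Int)) true := by
    rw [pv_A_keys]
    apply pv_sorted_rev_key_congr
    intro x hx
    have hx' : 1 ≤ x ∧ x ≤ 60 := by
      have := (PySem.List.mem_pyRange_one).1 hx; omega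
    rw [pv_A_getD _ x hx, pv_B_outer _ _ _ x hx' (by simp [PySem.Dict.keys_empty]) (by simp [PySem.Dict.keys_empty])]
    simp [PySem.Dict.contains_empty]
  rw [hsort]
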